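-- pv_equiv track=rewrite | github.com/forrest-molg/CANlogger | backend/capture_service.py | _merge_state
-- ===== SOURCE A (Python) =====
-- def _merge_state(states: list[str]) -> str:
--     if any(s == "ERROR" for s in states):
--         return "ERROR"
--     if any(s == "ACTIVE" for s in states):
--         return "ACTIVE"
--     if all(s == "OFFLINE" for s in states):
--         return "OFFLINE"
--     return "IDLE"
-- ===== SOURCE B (Python) =====
-- _LEVELS = ["OFFLINE", "IDLE", "ACTIVE", "ERROR"]
--
-- def _rank(s):
--     if s == "ERROR":
--         return 3
--     if s == "ACTIVE":
--         return 2
--     if s == "OFFLINE":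
--         return 0
--     return 1
--
-- def _merge_state(states: list[str]) -> str:
--     rank = 0
--     for s in states:
--         r = _rank(s)
--         if r > rank:
--             rank = r
--     return _LEVELS[rank]
-- ===== Notes on version B (the rewrite author's own statement) =====
-- stated objective: alternative
-- what changed: B makes one pass, mapping each state to a numeric severity rank (ERROR=3, ACTIVE=2, other=1, OFFLINE=0), keeps the running maximum, and decodes it through a lookup table, instead of A's three staged any/all scans over the list.
import Mathlib
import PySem

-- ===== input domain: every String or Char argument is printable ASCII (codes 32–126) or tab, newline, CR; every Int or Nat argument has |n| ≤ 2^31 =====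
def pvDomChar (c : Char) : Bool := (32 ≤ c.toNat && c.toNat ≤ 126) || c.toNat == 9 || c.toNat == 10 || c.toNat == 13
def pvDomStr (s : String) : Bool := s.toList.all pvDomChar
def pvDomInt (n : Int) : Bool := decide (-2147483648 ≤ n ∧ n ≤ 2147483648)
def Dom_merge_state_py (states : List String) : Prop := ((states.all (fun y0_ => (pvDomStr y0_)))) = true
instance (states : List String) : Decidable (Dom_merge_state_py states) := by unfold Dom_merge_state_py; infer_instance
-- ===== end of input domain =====

-- ===== PORT A =====
-- B replaces A's three staged any/all scans by a single max-severity fold with a table decode; same value everywhere.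
def merge_state_py (states : List String) : String :=
  if states.any (fun s => s == "ERROR") then "ERROR"
  else if states.any (fun s => s == "ACTIVE") then "ACTIVE"
  else if states.all (fun s => s == "OFFLINE") then "OFFLINE"
  else "IDLE"

-- ===== PORT B =====
def pvLevels : List String := ["OFFLINE", "IDLE", "ACTIVE", "ERROR"]

def pvRank (s : String) : Nat :=
  if s == "ERROR" then 3
  else if s == "ACTIVE" then 2
  else if s == "OFFLINE" then 0
  else 1

def merge_state_py_alt (states : List String) : String :=
  let rank := states.foldl (fun rank s => if pvRank s > rank then pvRank s else rank) 0
  pvLevels.getD rank "IDLE"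

-- ===== PRECONDITION & SPEC =====
def Spec_merge_state_py (states : List String) (out : String) : Prop := out = merge_state_py_alt states
instance (states : List String) (out : String) : Decidable (Spec_merge_state_py states out) := by unfold Spec_merge_state_py; infer_instance

-- ===== CLAIM (what is proved, stated in full; the proofs are below) =====
def Claim_equal_merge_state_py : Prop := ∀ (states : List String), Dom_merge_state_py states → Spec_merge_state_py states (merge_state_py states)

-- ===== LEMMAS AND PROOFS =====
def pvFold (states : List String) : Nat :=
  states.foldl (fun rank s => if pvRank s > rank then pvRank s else rank) 0

def pvMax : List String → Nat
  | [] => 0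
  | s :: t => max (pvRank s) (pvMax t)

theorem pvFold_acc (states : List String) (a : Nat) :
    states.foldl (fun rank s => if pvRank s > rank then pvRank s else rank) a
      = max a (pvMax states) := by
  induction states generalizing a with
  | nil => simp [pvMax]
  | cons s t ih =>
    rw [List.foldl_cons, ih]
    simp only [pvMax]
    split_ifs <;> omega

theorem pvFold_eq (states : List String) : pvFold states = pvMax states := by
  unfold pvFold
  rw [pvFold_acc]
  omega

theorem pvFold_cons (s : String) (t : List String) :
    pvFold (s :: t) = max (pvRank s) (pvFold t) := by
  rw [pvFold_eq, pvFold_eq]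
  rfl

theorem pvRank_le (s : String) : pvRank s ≤ 3 := by
  unfold pvRank; split_ifs <;> omega

theorem pvFold_le (states : List String) : pvFold states ≤ 3 := by
  induction states with
  | nil => simp [pvFold]
  | cons s t ih => rw [pvFold_cons]; have := pvRank_le s; omega

theorem pvFold_eq3 (states : List String) :
    pvFold states = 3 ↔ states.any (fun s => s == "ERROR") = true := by
  induction states with
  | nil => simp [pvFold]
  | cons s t ih =>
    rw [pvFold_cons, List.any_cons]
    have hs := pvRank_le s
    have ht := pvFold_le t
    constructor
    · intro h
      have hcase : pvRank s = 3 ∨ pvFold t = 3 := by omega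
      rcases hcase with h3 | h3
      · refine Bool.or_eq_true_iff.mpr (Or.inl ?_)
        by_contra hne
        have hb : (s == "ERROR") = false := by simpa using hne
        simp only [pvRank, hb] at h3
        split_ifs at h3 <;> omega
      · exact Bool.or_eq_true_iff.mpr (Or.inr (ih.mp h3))
    · intro h
      rcases Bool.or_eq_true_iff.mp h with h | h
      · have hs3 : s = "ERROR" := by simpa using h
        subst hs3
        have : pvRank "ERROR" = 3 := by decide
        omega
      · have := ih.mpr h; omega
theorem pvActive_ge2 (states : List String) :
    states.any (fun s => s == "ACTIVE") = true → 2 ≤ pvFold states := by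
  induction states with
  | nil => simp
  | cons s t ih =>
    rw [List.any_cons, pvFold_cons]
    intro h
    rcases Bool.or_eq_true_iff.mp h with h | h
    · have hs2 : s = "ACTIVE" := by simpa using h
      subst hs2
      have : pvRank "ACTIVE" = 2 := by decide
      omega
    · have := ih h; omega

theorem pvFold_eq2_active (states : List String) :
    pvFold states = 2 → states.any (fun s => s == "ACTIVE") = true := by
  induction states with
  | nil => simp [pvFold]
  | cons s t ih =>
    rw [pvFold_cons, List.any_cons]
    intro h
    have hs := pvRank_le s
    have ht := pvFold_le t
    have hcase : pvRank s = 2 ∨ pvFold t = 2 := by omega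
    rcases hcase with h2 | h2
    · refine Bool.or_eq_true_iff.mpr (Or.inl ?_)
      by_contra hne
      have hb : (s == "ACTIVE") = false := by simpa using hne
      simp only [pvRank, hb] at h2
      split_ifs at h2 <;> omega
    · exact Bool.or_eq_true_iff.mpr (Or.inr (ih h2))

theorem pvFold_eq0 (states : List String) :
    pvFold states = 0 ↔ states.all (fun s => s == "OFFLINE") = true := by
  induction states with
  | nil => simp [pvFold]
  | cons s t ih =>
    rw [pvFold_cons, List.all_cons]
    constructor
    · intro h
      have h1 : pvRank s = 0 := by omega
      have h2 : pvFold t = 0 := by omega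
      refine Bool.and_eq_true_iff.mpr ⟨?_, ih.mp h2⟩
      by_contra hne
      have hb : (s == "OFFLINE") = false := by simpa using hne
      simp only [pvRank, hb] at h1
      split_ifs at h1 <;> omega
    · intro h
      rcases Bool.and_eq_true_iff.mp h with ⟨h1, h2⟩
      have hs0 : s = "OFFLINE" := by simpa using h1
      subst hs0
      have : pvRank "OFFLINE" = 0 := by decide
      have := ih.mpr h2
      omega

-- ===== VERDICT (by name: the statement is the Claim_ definition above) =====
theorem merge_state_py_spec : Claim_equal_merge_state_py := by
  intro states _
  unfold Spec_merge_state_py merge_state_py merge_state_py_alt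
  show _ = pvLevels.getD (pvFold states) "IDLE"
  have hle := pvFold_le states
  split_ifs with hE hA hO
  · have : pvFold states = 3 := (pvFold_eq3 states).mpr hE
    simp [this, pvLevels]
  · have h3 : pvFold states ≠ 3 := fun h => hE ((pvFold_eq3 states).mp h)
    have h2 : 2 ≤ pvFold states := pvActive_ge2 states hA
    have : pvFold states = 2 := by omega
    simp [this, pvLevels]
  · have : pvFold states = 0 := (pvFold_eq0 states).mpr hO
    simp [this, pvLevels]
  · have h3 : pvFold states ≠ 3 := fun h => hE ((pvFold_eq3 states).mp h)
    have h2 : pvFold states ≠ 2 := fun h => hA (pvFold_eq2_active states h)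
    have h0 : pvFold states ≠ 0 := fun h => hO ((pvFold_eq0 states).mp h)
    have : pvFold states = 1 := by omega
    simp [this, pvLevels]
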